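-- pv_equiv track=rewrite | github.com/RK0429/cespy | src/cespy/editor/spice_editor.py | _first_token_upped
-- ===== SOURCE A (Python) =====
-- def _first_token_upped(line: str) -> str:
--     """(Private function.
--
--     Not to be used directly) Returns the first non-space character in the line. If a
--     point '.' is found, then it gets the primitive associated.
--     """
--     i = 0
--     while i < len(line) and line[i] in (" ", "\t"):
--         i += 1
--     j = i
--     while i < len(line) and line[i] not in (" ", "\t"):
--         i += 1
--     return line[j:i].upper()
-- ===== SOURCE B (Python) =====
-- import re
--
-- _TOKEN_RE = re.compile(r"[ \t]*([^ \t]*)")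
--
-- def _first_token_upped(line: str) -> str:
--     """Uppercased first token: regex skips leading spaces/tabs, captures the
--     first maximal run of non-space/non-tab characters (may be empty)."""
--     return _TOKEN_RE.match(line).group(1).upper()
-- ===== Notes on version B (the rewrite author's own statement) =====
-- stated objective: idiomatic
-- what changed: Replaced the two explicit index-advancing while-loops with a single precompiled regex match (skip leading spaces/tabs, capture the maximal run of non-space/non-tab characters) whose group is uppercased.
import Mathlib
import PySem

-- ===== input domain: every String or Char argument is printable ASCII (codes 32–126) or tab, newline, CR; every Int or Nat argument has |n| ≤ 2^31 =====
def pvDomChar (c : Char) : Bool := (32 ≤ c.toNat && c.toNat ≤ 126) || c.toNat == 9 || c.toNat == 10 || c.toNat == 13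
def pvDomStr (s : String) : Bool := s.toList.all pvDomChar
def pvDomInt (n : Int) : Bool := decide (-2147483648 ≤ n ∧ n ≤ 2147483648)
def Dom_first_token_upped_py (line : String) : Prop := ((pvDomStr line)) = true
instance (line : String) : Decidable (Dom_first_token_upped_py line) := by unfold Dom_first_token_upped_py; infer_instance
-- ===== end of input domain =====

-- B replaces A's two index-advancing while-loops with a single regex match
-- r"[ \t]*([^ \t]*)" whose captured group is uppercased (idiomatic; same cost).

-- ===== PORT A =====
-- first while-loop: advance i while line[i] is ' ' or '\t' (index always in range, guarded by i < len)
def ftuSkipBlank (s : List Char) (i : Nat) : Nat :=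
  if _h : i < s.length then
    if (PySem.List.pyGetD s (i : Int) ' ') == ' ' || (PySem.List.pyGetD s (i : Int) ' ') == '\t' then
      ftuSkipBlank s (i + 1)
    else i
  else i
termination_by s.length - i

-- second while-loop: advance i while line[i] is NOT ' '/'\t'
def ftuSkipTok (s : List Char) (i : Nat) : Nat :=
  if _h : i < s.length then
    if !((PySem.List.pyGetD s (i : Int) ' ') == ' ' || (PySem.List.pyGetD s (i : Int) ' ') == '\t') then
      ftuSkipTok s (i + 1)
    else i
  else i
termination_by s.length - i

def first_token_upped_py (line : String) : String :=
  let s := line.toList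
  let j := ftuSkipBlank s 0
  let i := ftuSkipTok s j
  -- line[j:i].upper()
  PySem.Str.upper (String.mk (PySem.List.slice s (some (j : Int)) (some (i : Int))))

-- ===== PORT B =====
-- regex r"[ \t]*([^ \t]*)": the capture is the maximal non-blank run after the
-- maximal leading blank run — dropWhile blank, then takeWhile non-blank; then .upper()
def first_token_upped_py_alt (line : String) : String :=
  PySem.Str.upper (String.mk
    ((line.toList.dropWhile (fun c => c == ' ' || c == '\t')).takeWhile
      (fun c => !(c == ' ' || c == '\t'))))

-- ===== PRECONDITION & SPEC =====
def Spec_first_token_upped_py (line : String) (out : String) : Prop := out = first_token_upped_py_alt line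
instance (line : String) (out : String) : Decidable (Spec_first_token_upped_py line out) := by unfold Spec_first_token_upped_py; infer_instance

-- ===== CLAIM (what is proved, stated in full; the proofs are below) =====
def Claim_equal_first_token_upped_py : Prop := ∀ (line : String), Dom_first_token_upped_py line → Spec_first_token_upped_py line (first_token_upped_py line)

-- ===== LEMMAS AND PROOFS =====

def ftuBlank (c : Char) : Bool := c == ' ' || c == '\t'

lemma ftuSkipBlank_eq (s : List Char) (i : Nat) :
    ftuSkipBlank s i = i + ((s.drop i).takeWhile ftuBlank).length := by
  fun_induction ftuSkipBlank s i with
  | case1 i h hb ih =>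
    rw [ih, List.drop_eq_getElem_cons h]
    simp only [PySem.List.pyGetD_natCast, List.getD_eq_getElem?_getD,
      List.getElem?_eq_getElem h, Option.getD_some] at hb
    rw [List.takeWhile_cons]
    have hbt : ftuBlank s[i] = true := hb
    rw [hbt]
    simp
    omega
  | case2 i h hb =>
    rw [List.drop_eq_getElem_cons h]
    simp only [PySem.List.pyGetD_natCast, List.getD_eq_getElem?_getD,
      List.getElem?_eq_getElem h, Option.getD_some] at hb
    rw [List.takeWhile_cons]
    have hbf : ftuBlank s[i] = false := by simp [ftuBlank]; simpa using hb
    rw [hbf]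
    simp
  | case3 i h =>
    have hd : s.drop i = [] := List.drop_eq_nil_of_le (by omega)
    simp [hd]

lemma ftuSkipTok_eq (s : List Char) (i : Nat) :
    ftuSkipTok s i = i + ((s.drop i).takeWhile (fun c => !(ftuBlank c))).length := by
  fun_induction ftuSkipTok s i with
  | case1 i h hb ih =>
    rw [ih, List.drop_eq_getElem_cons h]
    simp only [PySem.List.pyGetD_natCast, List.getD_eq_getElem?_getD,
      List.getElem?_eq_getElem h, Option.getD_some] at hb
    rw [List.takeWhile_cons]
    have hbt : (!(ftuBlank s[i])) = true := hb
    rw [hbt]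
    simp
    omega
  | case2 i h hb =>
    rw [List.drop_eq_getElem_cons h]
    simp only [PySem.List.pyGetD_natCast, List.getD_eq_getElem?_getD,
      List.getElem?_eq_getElem h, Option.getD_some] at hb
    rw [List.takeWhile_cons]
    have hbt : ftuBlank s[i] = true := by
      simp only [ftuBlank]
      by_cases h1 : s[i] = ' ' <;> by_cases h2 : s[i] = '\t' <;> simp_all
    have hbf : (!(ftuBlank s[i])) = false := by simp [hbt]
    rw [hbf]
    simp
  | case3 i h =>
    have hd : s.drop i = [] := List.drop_eq_nil_of_le (by omega)
    simp [hd]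

lemma ftuDropLenTakeWhile (p : Char → Bool) (s : List Char) :
    s.drop ((s.takeWhile p).length) = s.dropWhile p := by
  nth_rewrite 2 [← List.takeWhile_append_dropWhile (p := p) (l := s)]
  exact List.drop_left ..

lemma ftuTakeLenTakeWhile (p : Char → Bool) (s : List Char) :
    s.take ((s.takeWhile p).length) = s.takeWhile p := by
  nth_rewrite 2 [← List.takeWhile_append_dropWhile (p := p) (l := s)]
  exact List.take_left ..

-- ===== VERDICT (by name: the statement is the Claim_ definition above) =====
theorem first_token_upped_py_spec : Claim_equal_first_token_upped_py := by
  intro line _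
  unfold Spec_first_token_upped_py first_token_upped_py first_token_upped_py_alt
  set s := line.toList with hs
  have hj : ftuSkipBlank s 0 = ((s.takeWhile ftuBlank).length) := by
    simpa using ftuSkipBlank_eq s 0
  have hdrop : s.drop (ftuSkipBlank s 0) = s.dropWhile ftuBlank := by
    rw [hj]; exact ftuDropLenTakeWhile _ _
  have hi : ftuSkipTok s (ftuSkipBlank s 0)
      = ftuSkipBlank s 0 + (((s.dropWhile ftuBlank).takeWhile (fun c => !(ftuBlank c))).length) := by
    rw [ftuSkipTok_eq, hdrop]
  simp only
  rw [PySem.List.slice_natCast, hi]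
  have : ftuSkipBlank s 0 + ((s.dropWhile ftuBlank).takeWhile (fun c => !(ftuBlank c))).length
      - ftuSkipBlank s 0 = ((s.dropWhile ftuBlank).takeWhile (fun c => !(ftuBlank c))).length := by
    omega
  rw [this, hdrop, ftuTakeLenTakeWhile]
  rfl
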